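-- pv_equiv track=rewrite | github.com/tmacychen/octos-test | test_run.py | detect_flaky_failure
-- ===== SOURCE A (Python) =====
-- from typing import Dict, List, Optional, Tuple
--
-- def detect_flaky_failure(failed_tests: List[str], passed_tests: List[str], all_tests: List[str]) -> bool:
--     """Detect if failure pattern suggests flaky test.
--
--     Returns True if:
--     - There was at least one failure
--     - At least one test PASSED after the first failure
--     This suggests the failure was due to state corruption that later cleared.
--
--     Args:
--         failed_tests: Tests that failed in this run
--         passed_tests: Tests that passed in this run
--         all_tests: All tests in execution order
--     """
--     if not failed_tests or not passed_tests:
--         return False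
--
--     # Find first failed test's position
--     first_failed_idx = None
--     for i, test in enumerate(all_tests):
--         if test in set(failed_tests):
--             first_failed_idx = i
--             break
--
--     if first_failed_idx is None:
--         return False
--
--     # Check if any passed tests come after the first failure
--     for i, test in enumerate(all_tests):
--         if i > first_failed_idx and test in set(passed_tests):
--             return True
--
--     return False
-- ===== SOURCE B (Python) =====
-- def detect_flaky_failure(failed_tests, passed_tests, all_tests):
--     failed = set(failed_tests)
--     passed = set(passed_tests)
--     seen_failure = False
--     for test in all_tests:
--         if not seen_failure and test in failed:
--             seen_failure = True
--         elif seen_failure and test in passed: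
--             return True
--     return False
-- ===== Notes on version B (the rewrite author's own statement) =====
-- stated objective: simpler
-- what changed: Replaced the two passes (find the first failed index, then rescan comparing indices) with a single forward pass maintaining a seen_failure flag, building each membership set once instead of per iteration; the empty-list guard disappears.
import Mathlib
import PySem

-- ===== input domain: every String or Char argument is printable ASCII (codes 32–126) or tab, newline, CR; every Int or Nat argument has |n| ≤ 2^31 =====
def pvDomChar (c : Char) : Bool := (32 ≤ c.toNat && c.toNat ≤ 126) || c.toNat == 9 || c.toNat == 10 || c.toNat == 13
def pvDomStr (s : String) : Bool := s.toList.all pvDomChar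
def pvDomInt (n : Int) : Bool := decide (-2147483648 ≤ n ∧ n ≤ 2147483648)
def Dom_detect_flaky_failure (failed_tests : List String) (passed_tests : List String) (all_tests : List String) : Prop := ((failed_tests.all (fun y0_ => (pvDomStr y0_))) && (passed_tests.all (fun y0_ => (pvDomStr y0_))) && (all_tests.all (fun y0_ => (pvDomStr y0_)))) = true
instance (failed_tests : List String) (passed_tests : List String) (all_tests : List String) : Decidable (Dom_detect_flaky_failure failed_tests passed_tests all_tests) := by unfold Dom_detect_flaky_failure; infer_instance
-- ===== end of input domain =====

-- B replaces A's two index-based scans with a single forward pass carrying a seen_failure flag; objective: simpler.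

-- ===== PORT A =====
-- first loop: 'for i, test in enumerate(all_tests): if test in set(failed_tests): first_failed_idx = i; break'
def pvAFindFirst (failed_tests : List String) (all_tests : List String) (i : Nat) : Option Nat :=
  match all_tests with
  | [] => none
  | t :: ts =>
    if (PySem.Set.ofList failed_tests).contains t then some i
    else pvAFindFirst failed_tests ts (i + 1)

-- second loop: 'for i, test in enumerate(all_tests): if i > first_failed_idx and test in set(passed_tests): return True'
def pvAScan (passed_tests : List String) (all_tests : List String) (i : Nat) (first_failed_idx : Nat) : Bool :=
  match all_tests with
  | [] => false
  | t :: ts =>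
    if first_failed_idx < i ∧ (PySem.Set.ofList passed_tests).contains t then true
    else pvAScan passed_tests ts (i + 1) first_failed_idx

def detect_flaky_failure (failed_tests : List String) (passed_tests : List String) (all_tests : List String) : Bool :=
  if failed_tests = [] ∨ passed_tests = [] then false
  else
    match pvAFindFirst failed_tests all_tests 0 with
    | none => false
    | some idx => pvAScan passed_tests all_tests 0 idx

-- ===== PORT B =====
-- single pass with a seen_failure flag; the sets are built once
def pvBLoop (failed : PySem.Set String) (passed : PySem.Set String) (all_tests : List String) (seen_failure : Bool) : Bool :=
  match all_tests with
  | [] => false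
  | t :: ts =>
    if !seen_failure && failed.contains t then pvBLoop failed passed ts true
    else if seen_failure && passed.contains t then true
    else pvBLoop failed passed ts seen_failure

def detect_flaky_failure_alt (failed_tests : List String) (passed_tests : List String) (all_tests : List String) : Bool :=
  pvBLoop (PySem.Set.ofList failed_tests) (PySem.Set.ofList passed_tests) all_tests false

-- ===== PRECONDITION & SPEC =====
def Spec_detect_flaky_failure (failed_tests : List String) (passed_tests : List String) (all_tests : List String) (out : Bool) : Prop := out = detect_flaky_failure_alt failed_tests passed_tests all_tests
instance (failed_tests : List String) (passed_tests : List String) (all_tests : List String) (out : Bool) : Decidable (Spec_detect_flaky_failure failed_tests passed_tests all_tests out) := by unfold Spec_detect_flaky_failure; infer_instance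

-- ===== CLAIM (what is proved, stated in full; the proofs are below) =====
def Claim_equal_detect_flaky_failure : Prop := ∀ (failed_tests : List String) (passed_tests : List String) (all_tests : List String), Dom_detect_flaky_failure failed_tests passed_tests all_tests → Spec_detect_flaky_failure failed_tests passed_tests all_tests (detect_flaky_failure failed_tests passed_tests all_tests)

-- ===== LEMMAS AND PROOFS =====

-- pvAFindFirst never returns an index below its starting counter
theorem pvAFindFirst_ge (failed_tests : List String) :
    ∀ (l : List String) (i idx : Nat), pvAFindFirst failed_tests l i = some idx → i ≤ idx := by
  intro l
  induction l with
  | nil => intro i idx h; simp [pvAFindFirst] at h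
  | cons t ts ih =>
    intro i idx h
    simp only [pvAFindFirst] at h
    by_cases hc : (PySem.Set.ofList failed_tests).contains t
    · simp only [hc, if_pos, Option.some.injEq] at h
      omega
    · simp only [hc, Bool.false_eq_true, if_false] at h
      exact Nat.le_of_succ_le (ih (i + 1) idx h)

-- with the flag set, B's loop is just 'any element passes'
theorem pvBLoop_true (failed passed : PySem.Set String) :
    ∀ (l : List String), pvBLoop failed passed l true = l.any (fun t => passed.contains t) := by
  intro l
  induction l with
  | nil => simp [pvBLoop]
  | cons t ts ih =>
    simp only [pvBLoop, Bool.not_true, Bool.false_and, Bool.true_and, List.any_cons]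
    split <;> simp_all

-- once the counter has passed the first-failure index, A's second loop is 'any element passes'
theorem pvAScan_all_after (passed_tests : List String) :
    ∀ (l : List String) (i idx : Nat), idx < i →
      pvAScan passed_tests l i idx = l.any (fun t => (PySem.Set.ofList passed_tests).contains t) := by
  intro l
  induction l with
  | nil => intro i idx _; simp [pvAScan]
  | cons t ts ih =>
    intro i idx h
    simp only [pvAScan, List.any_cons]
    rw [ih (i + 1) idx (Nat.lt_succ_of_lt h)]
    simp [h]

-- core single-pass / two-pass correspondence, generalized over the start counter
theorem pvMain (failed_tests passed_tests : List String) :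
    ∀ (l : List String) (i : Nat),
      (match pvAFindFirst failed_tests l i with
       | none => false
       | some idx => pvAScan passed_tests l i idx)
      = pvBLoop (PySem.Set.ofList failed_tests) (PySem.Set.ofList passed_tests) l false := by
  intro l
  induction l with
  | nil => intro i; simp [pvAFindFirst, pvBLoop]
  | cons t ts ih =>
    intro i
    by_cases hf : (PySem.Set.ofList failed_tests).contains t
    · simp only [pvAFindFirst, hf, if_pos, pvBLoop, Bool.not_false, Bool.true_and,
        Bool.false_and, Bool.false_eq_true, if_false]
      rw [pvBLoop_true]
      simp only [pvAScan, Nat.lt_irrefl, false_and, if_false]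
      exact pvAScan_all_after passed_tests ts (i + 1) i (Nat.lt_succ_self i)
    · simp only [pvAFindFirst, hf, if_neg, Bool.false_eq_true, not_false_eq_true, pvBLoop,
        Bool.not_false, Bool.true_and, Bool.false_and]
      rw [← ih (i + 1)]
      cases hfind : pvAFindFirst failed_tests ts (i + 1) with
      | none => simp
      | some idx =>
        have hge : i + 1 ≤ idx := pvAFindFirst_ge failed_tests ts (i + 1) idx hfind
        simp only [pvAScan]
        have : ¬ (idx < i) := by omega
        simp [this]

-- if the failed set is empty B's flag is never set, hence false
theorem pvBLoop_no_failed (passed : PySem.Set String) :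
    ∀ (l : List String), pvBLoop [] passed l false = false := by
  intro l
  induction l with
  | nil => simp [pvBLoop]
  | cons t ts ih => simpa [pvBLoop, PySem.Set.contains] using ih

-- if the passed set is empty B can never return true
theorem pvBLoop_no_passed (failed : PySem.Set String) :
    ∀ (l : List String) (b : Bool), pvBLoop failed [] l b = false := by
  intro l
  induction l with
  | nil => intro b; simp [pvBLoop]
  | cons t ts ih =>
    intro b
    simp only [pvBLoop, PySem.Set.contains, List.contains_nil, Bool.and_false,
      Bool.false_eq_true, if_false]
    split
    · exact ih true
    · exact ih b

-- ===== VERDICT (by name: the statement is the Claim_ definition above) =====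
theorem detect_flaky_failure_spec : Claim_equal_detect_flaky_failure := by
  intro failed_tests passed_tests all_tests _
  unfold Spec_detect_flaky_failure detect_flaky_failure detect_flaky_failure_alt
  by_cases hguard : failed_tests = [] ∨ passed_tests = []
  · rw [if_pos hguard]
    rcases hguard with h | h
    · subst h; exact (pvBLoop_no_failed _ all_tests).symm
    · subst h; exact (pvBLoop_no_passed _ all_tests false).symm
  · rw [if_neg hguard]
    exact pvMain failed_tests passed_tests all_tests 0
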